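-- pv_equiv track=rewrite | github.com/GTML-LAB/Equitorch | equitorch/utils/_indices.py | extract_scatter_indices
-- ===== SOURCE A (Python) =====
-- import bisect
-- from typing import List, Tuple, Any
--
-- def extract_scatter_indices(keys: List[List[int]]) -> Tuple[List[int], List[List[int]]]:
--     """
--     Process integer key lists to generate scatter indices and sorted unique keys.
--
--     Parameters
--     ----------
--     keys : List[List[int]]
--         A list of integer key lists. All lists must have the same length.
--
--     Returns
--     -------
--     indices : List[int]
--         A list where each element is the index of the corresponding key tuple in the sorted unique list.
--     scatter_keys : List[List[int]]
--         A list of lists containing the sorted unique key values for each original key list.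
--
--     Notes
--     -----
--     - If the input is empty, the function returns empty lists for `indices` and `scatter_keys`.
--
--     Examples
--     --------
--     >>> keys = [
--     ...     [1, 1, 2, 2],
--     ...     [1, 1, 2, 2]
--     ... ]
--     >>> extract_scatter_indices(keys)
--     ([0, 0, 1, 1], [[1, 2], [1, 2]])
--
--     >>> keys = [
--     ...     [5, 5, 5],
--     ...     [5, 5, 5]
--     ... ]
--     >>> extract_scatter_indices(keys)
--     ([0, 0, 0], [[5], [5]])
--
--     >>> keys = [
--     ...     [1, 1, 2, 3, 3],
--     ...     [1, 2, 2, 3, 3]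
--     ... ]
--     >>> extract_scatter_indices(keys)
--     ([0, 1, 2, 3, 3], [[1, 1, 2, 3], [1, 2, 2, 3]])
--     """
--     if not keys or not keys[0]:
--         return [], []
--
--     # 将每个位置的键打包成元组
--     tuple_list = list(zip(*keys))
--
--     # 排序并去重得到唯一的元组列表
--     scatter = sorted(set(tuple_list))
--
--     # 生成每个原始元组的索引
--     indices = []
--     for t in tuple_list:
--         idx = bisect.bisect_left(scatter, t)
--         indices.append(idx)
--
--     # 解压唯一元组列表为各键列表
--     if not scatter:
--         scatter_keys = []
--     else:
--         scatter_keys = [list(sk) for sk in zip(*scatter)]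
--
--     return indices, scatter_keys
-- ===== SOURCE B (Python) =====
-- from typing import List, Tuple
--
-- def extract_scatter_indices(keys: List[List[int]]) -> Tuple[List[int], List[List[int]]]:
--     if not keys or not keys[0]:
--         return [], []
--     tuple_list = list(zip(*keys))
--     pairs = sorted(enumerate(tuple_list), key=lambda p: p[1])
--     indices = [0] * len(tuple_list)
--     scatter = []
--     prev = None
--     rank = -1
--     for pos, t in pairs:
--         if prev is None or t != prev:
--             rank += 1
--             scatter.append(t)
--             prev = t
--         indices[pos] = rank
--     if not scatter:
--         scatter_keys = []
--     else:
--         scatter_keys = [list(sk) for sk in zip(*scatter)]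
--     return indices, scatter_keys
-- ===== Notes on version B (the rewrite author's own statement) =====
-- stated objective: alternative
-- what changed: Replaces the per-element bisect_left lookups into sorted(set(...)) by a single stable sort of (position, tuple) pairs followed by one sweep that builds the unique list and assigns a running rank, scattering it back into a preallocated indices array.
import Mathlib
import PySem

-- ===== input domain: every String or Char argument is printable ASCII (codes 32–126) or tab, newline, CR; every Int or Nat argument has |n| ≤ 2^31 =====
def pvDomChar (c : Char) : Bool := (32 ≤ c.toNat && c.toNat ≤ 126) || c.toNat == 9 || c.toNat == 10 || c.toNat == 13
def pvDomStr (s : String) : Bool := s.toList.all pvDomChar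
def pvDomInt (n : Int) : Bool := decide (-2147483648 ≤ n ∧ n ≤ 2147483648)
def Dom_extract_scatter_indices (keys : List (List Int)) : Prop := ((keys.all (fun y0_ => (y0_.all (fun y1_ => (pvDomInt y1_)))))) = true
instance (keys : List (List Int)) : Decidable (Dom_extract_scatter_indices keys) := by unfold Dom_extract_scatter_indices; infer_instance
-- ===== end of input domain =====

-- B replaces A's per-element bisect_left into sorted(set(...)) by one stable sort of
-- (position, tuple) pairs and a single sweep assigning a running rank (objective: alternative).

-- Shared helper: Python's zip(*rows) for a variable number of rows (columns of equal index,
-- truncated to the shortest row); exact step-for-step model of zip's iteration.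
def pyZipStar (rows : List (List Int)) : List (List Int) :=
  if h : rows.isEmpty || rows.any (fun r => r.isEmpty) then []
  else (rows.map (fun r => r.headD 0)) :: pyZipStar (rows.map (fun r => r.tail))
termination_by (rows.headD []).length
decreasing_by
  match rows with
  | [] => simp at h
  | r :: rest =>
    simp only [List.headD_cons]
    cases r with
    | nil => simp at h
    | cons a as => simp

-- ===== PORT A =====
def extract_scatter_indices (keys : List (List Int)) : List Int × List (List Int) :=
  if keys.isEmpty || (keys.headD []).isEmpty then ([], [])
  else
    let tuple_list := pyZipStar keys
    let scatter := PySem.List.sorted (PySem.Set.ofList tuple_list) (fun x => x)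
    let indices := tuple_list.foldl
      (fun acc t => acc ++ [((PySem.List.bisectLeft scatter t : Nat) : Int)]) []
    let scatter_keys := if scatter.isEmpty then [] else pyZipStar scatter
    (indices, scatter_keys)

-- ===== PORT B =====
-- one sweep step: `if prev is None or t != prev: rank += 1; scatter.append(t); prev = t` then `indices[pos] = rank`
def sweepStep (st : List Int × List (List Int) × Option (List Int) × Int)
    (p : Int × List Int) : List Int × List (List Int) × Option (List Int) × Int :=
  let (idx, scatter, prev, rank) := st
  let (pos, t) := p
  if prev = none ∨ ¬ prev = some t then
    (PySem.List.pySetD idx pos (rank + 1), scatter ++ [t], some t, rank + 1)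
  else
    (PySem.List.pySetD idx pos rank, scatter, prev, rank)

def extract_scatter_indices_alt (keys : List (List Int)) : List Int × List (List Int) :=
  if keys.isEmpty || (keys.headD []).isEmpty then ([], [])
  else
    let tuple_list := pyZipStar keys
    let pairs := PySem.List.sorted (PySem.List.enumerate tuple_list) (fun p => p.2)
    let st := pairs.foldl sweepStep (List.replicate tuple_list.length 0, [], none, -1)
    let scatter := st.2.1
    let scatter_keys := if scatter.isEmpty then [] else pyZipStar scatter
    (st.1, scatter_keys)

-- ===== PRECONDITION & SPEC =====
def Spec_extract_scatter_indices (keys : List (List Int)) (out : List Int × List (List Int)) : Prop := out = extract_scatter_indices_alt keys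
instance (keys : List (List Int)) (out : List Int × List (List Int)) : Decidable (Spec_extract_scatter_indices keys out) := by unfold Spec_extract_scatter_indices; infer_instance

-- ===== CLAIM (what is proved, stated in full; the proofs are below) =====
def Claim_equal_extract_scatter_indices : Prop := ∀ (keys : List (List Int)), Dom_extract_scatter_indices keys → Spec_extract_scatter_indices keys (extract_scatter_indices keys)

-- ===== LEMMAS AND PROOFS =====

-- countP of a "downward closed" predicate along a list equals the boundary index
lemma countP_of_boundary {α : Type} (p : α → Bool) :
    ∀ (xs : List α) (k : Nat), k ≤ xs.length →
    (∀ i (hi : i < xs.length), p xs[i] = true ↔ i < k) → xs.countP p = k := by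
  intro xs
  induction xs with
  | nil => intro k hk _; simp at hk ⊢; omega
  | cons a tl ih =>
    intro k hk h
    cases k with
    | zero =>
      have ha : ¬ p a = true := by
        have := h 0 (by simp); simpa using this
      have htl : tl.countP p = 0 := by
        apply ih 0 (Nat.zero_le _)
        intro i hi
        have := h (i+1) (by simpa using Nat.succ_lt_succ hi)
        simpa using this
      simp [List.countP_cons, ha, htl]
    | succ m =>
      have ha : p a = true := by
        have := h 0 (by simp); simpa using this
      have htl : tl.countP p = m := by
        apply ih m (by simpa using hk)
        intro i hi
        have := h (i+1) (by simpa using Nat.succ_lt_succ hi)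
        simpa [Nat.succ_lt_succ_iff] using this
      simp [List.countP_cons, ha, htl]

-- general analogue of PySem.List.bisectLeft_spec for tuple keys, as a countP characterisation
lemma bisectLoop_eq (xs : List (List Int)) (x : List Int)
    (hs : xs.Pairwise (· ≤ ·)) :
    ∀ (fuel lo hi : Nat), lo ≤ hi → hi ≤ xs.length → hi - lo ≤ fuel →
    (∀ j (hj : j < xs.length), j < lo → xs[j] < x) →
    (∀ j (hj : j < xs.length), hi ≤ j → ¬ xs[j] < x) →
    PySem.List.bisectLeftLoop xs x fuel lo hi = xs.countP (fun s => decide (s < x)) := by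
  have hmono := List.pairwise_iff_getElem.1 hs
  intro fuel
  induction fuel with
  | zero =>
    intro lo hi h1 h2 h3 hlo hhi
    have heq : lo = hi := by omega
    have h0 : PySem.List.bisectLeftLoop xs x 0 lo hi = lo := rfl
    rw [h0]
    refine (countP_of_boundary _ xs lo (by omega) ?_).symm
    intro i hi'
    constructor
    · intro hp
      by_contra hcon
      exact hhi i hi' (by omega) (by simpa using hp)
    · intro hil
      simpa using hlo i hi' hil
  | succ n ih =>
    intro lo hi h1 h2 h3 hlo hhi
    by_cases hlh : lo < hi
    · have hmid1 : lo ≤ (lo + hi) / 2 := by omega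
      have hmid2 : (lo + hi) / 2 < hi := by omega
      have hmlen : (lo + hi) / 2 < xs.length := by omega
      rw [PySem.List.bisectLeftLoop.eq_def]
      simp only [hlh, if_true, List.getElem?_eq_getElem hmlen]
      by_cases hy : xs[(lo + hi) / 2] < x
      · simp only [hy, if_true]
        apply ih ((lo + hi) / 2 + 1) hi (by omega) h2 (by omega) ?_ hhi
        intro j hj hjlt
        rcases Nat.lt_or_ge j ((lo + hi) / 2) with hc | hc
        · exact lt_of_le_of_lt (hmono j ((lo+hi)/2) hj hmlen hc) hy
        · have : j = (lo + hi) / 2 := by omega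
          subst this; exact hy
      · simp only [hy, if_false]
        apply ih lo ((lo + hi) / 2) (by omega) (by omega) (by omega) hlo ?_
        intro j hj hjge hcon
        rcases Nat.lt_or_ge ((lo + hi) / 2) j with hc | hc
        · exact hy (lt_of_le_of_lt (hmono ((lo+hi)/2) j hmlen hj hc) hcon)
        · have : j = (lo + hi) / 2 := by omega
          subst this; exact hy hcon
    · have heq : lo = hi := by omega
      rw [PySem.List.bisectLeftLoop.eq_def]
      simp only [hlh, if_false]
      refine (countP_of_boundary _ xs lo (by omega) ?_).symm
      intro i hi'
      constructor
      · intro hp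
        by_contra hcon
        exact hhi i hi' (by omega) (by simpa using hp)
      · intro hil
        simpa using hlo i hi' hil

lemma bisectLeft_eq (xs : List (List Int)) (x : List Int)
    (hs : xs.Pairwise (· ≤ ·)) :
    PySem.List.bisectLeft xs x = xs.countP (fun s => decide (s < x)) := by
  rw [PySem.List.bisectLeft.eq_def]
  exact bisectLoop_eq xs x hs xs.length 0 xs.length (Nat.zero_le _) le_rfl (by omega)
    (fun j hj hlt => absurd hlt (by omega)) (fun j hj hle => absurd hj (by omega))

lemma ofList_foldl_sublist {α : Type} [BEq α] :
    ∀ (xs s : List α), ∃ u, List.foldl PySem.Set.add s xs = s ++ u ∧ u.Sublist xs := by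
  intro xs
  induction xs with
  | nil => intro s; exact ⟨[], by simp, by simp⟩
  | cons x tl ih =>
    intro s
    by_cases hc : s.contains x
    · have hx : PySem.Set.add s x = s := by simp [PySem.Set.add, hc]
      obtain ⟨u, h1, h2⟩ := ih s
      exact ⟨u, by simpa [hx] using h1, h2.cons x⟩
    · have hx : PySem.Set.add s x = s ++ [x] := by simp [PySem.Set.add, hc]
      obtain ⟨u, h1, h2⟩ := ih (s ++ [x])
      exact ⟨x :: u, by simpa [hx, List.append_assoc] using h1, h2.cons₂ x⟩

lemma dedup_sublist {α : Type} [BEq α] [LawfulBEq α] (xs : List α) :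
    (PySem.List.dedup xs).Sublist xs := by
  rw [PySem.List.dedup_eq_ofList, PySem.Set.ofList_eq_foldl]
  obtain ⟨u, h1, h2⟩ := ofList_foldl_sublist xs []
  simpa [h1] using h2

lemma dedup_pairwise_lt (xs : List (List Int)) (h : xs.Pairwise (· ≤ ·)) :
    (PySem.List.dedup xs).Pairwise (· < ·) := by
  have h1 : (PySem.List.dedup xs).Pairwise (· ≤ ·) :=
    List.Pairwise.sublist (dedup_sublist xs) h
  have h2 : (PySem.List.dedup xs).Pairwise (· ≠ ·) := PySem.List.nodup_dedup xs
  exact (h1.and h2).imp (fun hab => lt_of_le_of_ne hab.1 hab.2)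

lemma perm_of_nodup_mem {α : Type} (l l' : List α) (h : l.Nodup) (h' : l'.Nodup)
    (hm : ∀ a, a ∈ l ↔ a ∈ l') : l.Perm l' :=
  (List.perm_ext_iff_of_nodup h h').mpr hm

lemma dedup_append_mem {α : Type} [BEq α] [LawfulBEq α] (Q : List α) (t : α)
    (ht : t ∈ Q) : PySem.List.dedup (Q ++ [t]) = PySem.List.dedup Q := by
  rw [PySem.List.dedup_eq_ofList, PySem.List.dedup_eq_ofList,
      PySem.Set.ofList_eq_foldl, PySem.Set.ofList_eq_foldl, List.foldl_append]
  have hmem : t ∈ List.foldl PySem.Set.add [] Q := by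
    rw [← PySem.Set.ofList_eq_foldl]; exact (PySem.Set.mem_ofList Q t).2 ht
  simp [PySem.Set.add, hmem]

lemma dedup_append_not_mem {α : Type} [BEq α] [LawfulBEq α] (Q : List α) (t : α)
    (ht : t ∉ Q) : PySem.List.dedup (Q ++ [t]) = PySem.List.dedup Q ++ [t] := by
  rw [PySem.List.dedup_eq_ofList, PySem.List.dedup_eq_ofList,
      PySem.Set.ofList_eq_foldl, PySem.Set.ofList_eq_foldl, List.foldl_append]
  have hmem : t ∉ List.foldl PySem.Set.add [] Q := by
    rw [← PySem.Set.ofList_eq_foldl]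
    intro hc; exact ht ((PySem.Set.mem_ofList Q t).1 hc)
  simp [PySem.Set.add, hmem]

lemma le_getLast_of_pairwise :
    ∀ (Q : List (List Int)) (m q : List Int),
    Q.Pairwise (· ≤ ·) → Q.getLast? = some m → q ∈ Q → q ≤ m := by
  intro Q
  induction Q with
  | nil => intro m q _ _ hq; cases hq
  | cons a tl ih =>
    intro m q h hm hq
    cases tl with
    | nil =>
      simp at hm hq; subst hm; subst hq; exact le_rfl
    | cons b tl2 =>
      rw [List.getLast?_cons_cons] at hm
      rcases List.mem_cons.1 hq with rfl | hq'
      · exact (List.pairwise_cons.1 h).1 m (List.mem_of_getLast? hm)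
      · exact ih m q (List.pairwise_cons.1 h).2 hm hq'

-- distinct values below t are not contributed by a tail whose values are all ≥ t
lemma countP_dedup_append (Q rest : List (List Int)) (t : List Int)
    (hrest : ∀ r ∈ rest, t ≤ r) :
    (PySem.List.dedup (Q ++ rest)).countP (fun s => decide (s < t)) =
    (PySem.List.dedup Q).countP (fun s => decide (s < t)) := by
  rw [List.countP_eq_length_filter, List.countP_eq_length_filter]
  apply List.Perm.length_eq
  apply perm_of_nodup_mem _ _ ((PySem.List.nodup_dedup _).filter _) ((PySem.List.nodup_dedup _).filter _)
  intro a
  simp only [List.mem_filter, PySem.List.mem_dedup, List.mem_append, decide_eq_true_eq]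
  constructor
  · rintro ⟨hmem, hlt⟩
    rcases hmem with hQ | hr
    · exact ⟨hQ, hlt⟩
    · exact absurd hlt (not_lt.2 (hrest a hr))
  · rintro ⟨hQ, hlt⟩
    exact ⟨Or.inl hQ, hlt⟩

lemma countP_dedup_last (Q : List (List Int)) (t : List Int)
    (h : Q.Pairwise (· ≤ ·)) (hm : Q.getLast? = some t) :
    (PySem.List.dedup Q).countP (fun s => decide (s < t)) =
    (PySem.List.dedup Q).length - 1 := by
  have hmem : t ∈ PySem.List.dedup Q := (PySem.List.mem_dedup Q t).2 (List.mem_of_getLast? hm)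
  have hle : ∀ s ∈ PySem.List.dedup Q, s ≤ t := fun s hs =>
    le_getLast_of_pairwise Q t s h hm ((PySem.List.mem_dedup Q s).1 hs)
  have hnd : (PySem.List.dedup Q).Nodup := PySem.List.nodup_dedup Q
  have hsplit := List.length_eq_countP_add_countP (fun s => decide (s < t))
    (l := PySem.List.dedup Q)
  have hcong : (PySem.List.dedup Q).countP (fun s => decide ¬ (decide (s < t)) = true) =
      (PySem.List.dedup Q).countP (fun s => s == t) := by
    apply List.countP_congr
    intro s hs
    simp only [decide_eq_true_eq, beq_iff_eq]
    constructor
    · intro hns; exact le_antisymm (hle s hs) (not_lt.1 (by simpa using hns))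
    · intro hst; simp [hst]
  have hcount : (PySem.List.dedup Q).countP (fun s => s == t) = 1 := by
    have := List.count_eq_one_of_mem hnd hmem
    simpa [List.count] using this
  omega

lemma countP_dedup_all_lt (Q : List (List Int)) (t : List Int)
    (hall : ∀ q ∈ Q, q < t) :
    (PySem.List.dedup Q).countP (fun s => decide (s < t)) =
    (PySem.List.dedup Q).length := by
  apply List.countP_eq_length.2
  intro a ha
  simpa using hall a ((PySem.List.mem_dedup Q a).1 ha)


-- PySem.List.sorted only reads the Boolean results of `decide (key a < key b)`, so the
-- choice of (propositionally equal) LT/DecidableLT instances does not matter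
lemma sorted_decide_irrel {α κ : Type} (i1 i2 : LT κ) (d1 : @DecidableLT κ i1)
    (d2 : @DecidableLT κ i2) (hiff : ∀ a b : κ, (@LT.lt κ i1 a b) ↔ (@LT.lt κ i2 a b))
    (xs : List α) (key : α → κ) :
    @PySem.List.sorted α κ i1 d1 xs key false = @PySem.List.sorted α κ i2 d2 xs key false := by
  rw [@PySem.List.sorted.eq_def α κ i1 d1, @PySem.List.sorted.eq_def α κ i2 d2]
  have hb : (fun a b : α => @decide _ (d1 (key a) (key b)))
      = (fun a b : α => @decide _ (d2 (key a) (key b))) := by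
    funext a b
    exact decide_eq_decide.mpr (hiff _ _)
  simp only [Bool.false_eq_true, if_false, hb]

lemma sortedS_eq (xs : List (List Int)) :
    PySem.List.sorted (PySem.Set.ofList xs) (fun x => x)
    = @PySem.List.sorted (List Int) (List Int) List.instLinearOrder.toLT
        (@LinearOrder.toDecidableLT (List Int) List.instLinearOrder)
        (PySem.Set.ofList xs) (fun x => x) false :=
  sorted_decide_irrel _ _ _ _ (fun a b => Iff.rfl) _ _

lemma sortedP_eq (xs : List (List Int)) :
    PySem.List.sorted (PySem.List.enumerate xs) (fun p => p.2)
    = @PySem.List.sorted (Int × List Int) (List Int) List.instLinearOrder.toLT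
        (@LinearOrder.toDecidableLT (List Int) List.instLinearOrder)
        (PySem.List.enumerate xs) (fun p => p.2) false :=
  sorted_decide_irrel _ _ _ _ (fun a b => Iff.rfl) _ _

-- the sweep invariant: folding sweepStep over a key-sorted pair list builds the ordered
-- dedup as scatter and writes rank = countP (< t) of the full dedup at each position
lemma sweep_inv (W : List (List Int)) :
    ∀ (R : List (Int × List Int)) (Q : List (List Int)) (idx : List Int),
    (Q ++ R.map (fun p => p.2)).Pairwise (· ≤ ·) →
    W = PySem.List.dedup (Q ++ R.map (fun p => p.2)) →
    List.foldl sweepStep (idx, PySem.List.dedup Q, Q.getLast?, ((PySem.List.dedup Q).length : Int) - 1) R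
    = (R.foldl (fun a p => PySem.List.pySetD a p.1 ((W.countP (fun s => decide (s < p.2)) : Int))) idx,
       W, (Q ++ R.map (fun p => p.2)).getLast?, ((W.length : Int) - 1)) := by
  intro R
  induction R with
  | nil =>
    intro Q idx h hW
    subst hW
    simp
  | cons p R' ih =>
    intro Q idx h hW
    obtain ⟨pos, t⟩ := p
    have hmapcons : ((pos, t) :: R').map (fun p => p.2) = t :: R'.map (fun p => p.2) := by simp
    rw [hmapcons] at h hW
    have hassoc : Q ++ t :: R'.map (fun p => p.2) = (Q ++ [t]) ++ R'.map (fun p => p.2) := by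
      simp [List.append_assoc]
    have hpair' : ((Q ++ [t]) ++ R'.map (fun p => p.2)).Pairwise (· ≤ ·) := by
      rw [← hassoc]; exact h
    have hW' : W = PySem.List.dedup ((Q ++ [t]) ++ R'.map (fun p => p.2)) := by
      rw [← hassoc]; exact hW
    have hQpair : Q.Pairwise (· ≤ ·) := (List.pairwise_append.1 h).1
    have hQle : ∀ q ∈ Q, q ≤ t := fun q hq =>
      (List.pairwise_append.1 h).2.2 q hq t (by simp)
    have hrestge : ∀ r ∈ t :: R'.map (fun p => p.2), t ≤ r := by
      intro r hr
      rcases List.mem_cons.1 hr with rfl | hr'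
      · exact le_rfl
      · exact (List.pairwise_cons.1 (List.pairwise_append.1 h).2.1).1 r hr'
    have hWcount : W.countP (fun s => decide (s < t)) =
        (PySem.List.dedup Q).countP (fun s => decide (s < t)) := by
      rw [hW]
      exact countP_dedup_append Q _ t hrestge
    by_cases hprev : Q.getLast? = some t
    · -- duplicate of the previous tuple: scatter, prev, rank unchanged
      have htQ : t ∈ Q := List.mem_of_getLast? hprev
      have hlen1 : 1 ≤ (PySem.List.dedup Q).length :=
        List.length_pos_of_mem ((PySem.List.mem_dedup Q t).2 htQ)
      have hval : ((W.countP (fun s => decide (s < t)) : Nat) : Int) =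
          ((PySem.List.dedup Q).length : Int) - 1 := by
        rw [hWcount, countP_dedup_last Q t hQpair hprev]
        omega
      have hstep : sweepStep (idx, PySem.List.dedup Q, Q.getLast?,
          ((PySem.List.dedup Q).length : Int) - 1) (pos, t)
          = (PySem.List.pySetD idx pos (((PySem.List.dedup Q).length : Int) - 1),
             PySem.List.dedup Q, some t, ((PySem.List.dedup Q).length : Int) - 1) := by
        simp [sweepStep, hprev]
      rw [List.foldl_cons, hstep]
      have hd : PySem.List.dedup (Q ++ [t]) = PySem.List.dedup Q := dedup_append_mem Q t htQ
      have hrec := ih (Q ++ [t])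
        (PySem.List.pySetD idx pos (((PySem.List.dedup Q).length : Int) - 1)) hpair' hW'
      rw [hd, List.getLast?_concat] at hrec
      rw [hrec]
      simp only [List.foldl_cons, List.map_cons, List.append_assoc, List.singleton_append]
      rw [hval]
    · -- new tuple: append to scatter, bump rank
      have htQ : t ∉ Q := by
        intro hc
        have hne : Q ≠ [] := by intro hnil; subst hnil; cases hc
        obtain ⟨m, hm⟩ := Option.isSome_iff_exists.1 (List.getLast?_isSome.2 hne)
        have h1 : t ≤ m := le_getLast_of_pairwise Q m t hQpair hm hc
        have h2 : m ≤ t := hQle m (List.mem_of_getLast? hm)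
        exact hprev (by rw [hm, le_antisymm h2 h1])
      have hall : ∀ q ∈ Q, q < t := fun q hq =>
        lt_of_le_of_ne (hQle q hq) (fun he => htQ (he ▸ hq))
      have hval : ((W.countP (fun s => decide (s < t)) : Nat) : Int) =
          ((PySem.List.dedup Q).length : Int) := by
        rw [hWcount, countP_dedup_all_lt Q t hall]
      have hstep : sweepStep (idx, PySem.List.dedup Q, Q.getLast?,
          ((PySem.List.dedup Q).length : Int) - 1) (pos, t)
          = (PySem.List.pySetD idx pos ((PySem.List.dedup Q).length : Int),
             PySem.List.dedup Q ++ [t], some t, ((PySem.List.dedup Q).length : Int)) := by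
        have hcond : Q.getLast? = none ∨ ¬ Q.getLast? = some t := Or.inr hprev
        simp only [sweepStep, if_pos hcond]
        norm_num
      rw [List.foldl_cons, hstep]
      have hd : PySem.List.dedup (Q ++ [t]) = PySem.List.dedup Q ++ [t] :=
        dedup_append_not_mem Q t htQ
      have hrec := ih (Q ++ [t])
        (PySem.List.pySetD idx pos ((PySem.List.dedup Q).length : Int)) hpair' hW'
      rw [hd, List.getLast?_concat] at hrec
      have hlen2 : (((PySem.List.dedup Q ++ [t]).length : Int)) - 1 =
          ((PySem.List.dedup Q).length : Int) := by
        simp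
      rw [hlen2] at hrec
      rw [hrec]
      simp only [List.foldl_cons, List.map_cons, List.append_assoc, List.singleton_append]
      rw [hval]

lemma length_foldl_set (f : List Int → Int) :
    ∀ (P : List (Int × List Int)) (a : List Int),
    (P.foldl (fun a p => PySem.List.pySetD a p.1 (f p.2)) a).length = a.length := by
  intro P
  induction P with
  | nil => intro a; rfl
  | cons p P' ih =>
    intro a
    rw [List.foldl_cons, ih]
    exact PySem.List.length_pySetD a p.1 (f p.2)

lemma foldl_set_not_mem (f : List Int → Int) :
    ∀ (P : List (Int × List Int)) (a : List Int) (j : Nat),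
    (∀ p ∈ P, 0 ≤ p.1) → (j : Int) ∉ P.map (fun p => p.1) → (hlen : j < a.length) →
    (P.foldl (fun a p => PySem.List.pySetD a p.1 (f p.2)) a)[j]'(by rw [length_foldl_set]; exact hlen) = a[j] := by
  intro P
  induction P with
  | nil => intro a j _ _ hlen; rfl
  | cons p P' ih =>
    intro a j hpos hj hlen
    have hp0 : 0 ≤ p.1 := hpos p (by simp)
    have hne : p.1 ≠ (j : Int) := by
      intro hc; exact hj (by simp [← hc])
    have hlen' : j < (PySem.List.pySetD a p.1 (f p.2)).length := by
      rw [PySem.List.length_pySetD]; exact hlen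
    have hstep := ih (PySem.List.pySetD a p.1 (f p.2)) j
      (fun q hq => hpos q (by simp [hq]))
      (by intro hc; exact hj (by simp at hc ⊢; exact Or.inr hc)) hlen'
    have hset : PySem.List.pySetD a p.1 (f p.2) = a.set p.1.toNat (f p.2) :=
      PySem.List.pySetD_of_nonneg a (f p.2) hp0
    have hnat : p.1.toNat ≠ j := by
      intro hc
      exact hne (by rw [← hc, Int.toNat_of_nonneg hp0])
    calc (List.foldl (fun a p => PySem.List.pySetD a p.1 (f p.2)) a (p :: P'))[j]'(by rw [length_foldl_set]; exact hlen)
        = (PySem.List.pySetD a p.1 (f p.2))[j]'hlen' := hstep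
      _ = a[j] := by
          simp only [hset]
          exact List.getElem_set_ne hnat _

lemma foldl_set_mem (f : List Int → Int) :
    ∀ (P : List (Int × List Int)) (a : List Int) (j : Nat) (t : List Int),
    (∀ p ∈ P, 0 ≤ p.1) → (P.map (fun p => p.1)).Nodup → ((j : Int), t) ∈ P → (hlen : j < a.length) →
    (P.foldl (fun a p => PySem.List.pySetD a p.1 (f p.2)) a)[j]'(by rw [length_foldl_set]; exact hlen) = f t := by
  intro P
  induction P with
  | nil => intro a j t _ _ hmem _; cases hmem
  | cons p P' ih =>
    intro a j t hpos hnd hmem hlen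
    have hlen' : j < (PySem.List.pySetD a p.1 (f p.2)).length := by
      rw [PySem.List.length_pySetD]; exact hlen
    rcases List.mem_cons.1 hmem with heq | hmem'
    · -- written here, untouched afterwards
      have hp1 : p.1 = (j : Int) := by rw [← heq]
      have hp2 : p.2 = t := by rw [← heq]
      have hj' : (j : Int) ∉ P'.map (fun p => p.1) := by
        simp only [List.map_cons, List.nodup_cons] at hnd
        intro hc
        exact hnd.1 (hp1 ▸ hc)
      have hstep := foldl_set_not_mem f P' (PySem.List.pySetD a p.1 (f p.2)) j
        (fun q hq => hpos q (by simp [hq])) hj' hlen'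
      have hnat : p.1.toNat = j := by rw [hp1]; simp
      have hset : PySem.List.pySetD a p.1 (f p.2) = a.set j (f p.2) := by
        rw [PySem.List.pySetD_of_nonneg a (f p.2) (hpos p (by simp)), hnat]
      calc (List.foldl (fun a p => PySem.List.pySetD a p.1 (f p.2)) a (p :: P'))[j]'(by rw [length_foldl_set]; exact hlen)
          = (PySem.List.pySetD a p.1 (f p.2))[j]'hlen' := hstep
        _ = f t := by
            simp only [hset]
            rw [List.getElem_set_self, hp2]
    · -- written later
      have hstep := ih (PySem.List.pySetD a p.1 (f p.2)) j t
        (fun q hq => hpos q (by simp [hq]))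
        (by simp only [List.map_cons, List.nodup_cons] at hnd; exact hnd.2) hmem' hlen'
      exact hstep

-- ===== VERDICT (by name: the statement is the Claim_ definition above) =====
theorem extract_scatter_indices_spec : Claim_equal_extract_scatter_indices := by
  intro keys _
  unfold Spec_extract_scatter_indices extract_scatter_indices extract_scatter_indices_alt
  by_cases hg : (keys.isEmpty || (keys.headD []).isEmpty) = true
  · rw [if_pos hg, if_pos hg]
  · rw [if_neg hg, if_neg hg]
    dsimp only
    set ts := pyZipStar keys with hts
    set S := PySem.List.sorted (PySem.Set.ofList ts) (fun x => x) with hS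
    set P := PySem.List.sorted (PySem.List.enumerate ts) (fun p => p.2) with hP
    -- A's indices loop is a map of bisectLeft over the columns
    have hSlt : S.Pairwise (· < ·) := by
      rw [hS, sortedS_eq]; exact PySem.List.sorted_ofList_pairwise_lt ts
    have hSle : S.Pairwise (· ≤ ·) := hSlt.imp le_of_lt
    have hAmap : ts.foldl (fun acc t => acc ++ [((PySem.List.bisectLeft S t : Nat) : Int)]) []
        = ts.map (fun t => ((PySem.List.bisectLeft S t : Nat) : Int)) := by
      simpa using PySem.List.foldl_append_singleton_eq_map
        (fun t => ((PySem.List.bisectLeft S t : Nat) : Int)) ts []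
    -- the sorted pair list
    have hperm : P.Perm (PySem.List.enumerate ts) := by
      rw [hP]; exact PySem.List.sorted_perm _ _ _
    have hLp : (P.map (fun p => p.2)).Pairwise (· ≤ ·) := by
      rw [hP, sortedP_eq]
      exact PySem.List.sorted_map_key_pairwise (PySem.List.enumerate ts) (fun p => p.2)
    have hLperm : (P.map (fun p => p.2)).Perm ts := by
      have := hperm.map (fun p => p.2)
      rwa [PySem.List.map_snd_enumerate] at this
    -- the ordered dedup of the sorted tuples is exactly sorted(set(...))
    have hSd : S = PySem.List.dedup (P.map (fun p => p.2)) := by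
      rw [hS, sortedS_eq]
      apply (PySem.List.sorted_eq_of_perm_of_pairwise_lt (PySem.Set.ofList ts)
        (PySem.List.dedup (P.map (fun p => p.2))) (fun x => x) ?_ ?_)
      · apply perm_of_nodup_mem _ _ (PySem.List.nodup_dedup _) (PySem.Set.nodup_ofList ts)
        intro a
        rw [PySem.List.mem_dedup, PySem.Set.mem_ofList, hLperm.mem_iff]
      · exact dedup_pairwise_lt _ hLp
    -- run the sweep
    have hsw := sweep_inv S P [] (List.replicate ts.length 0) (by simpa using hLp)
      (by simpa using hSd)
    have hinit : PySem.List.dedup ([] : List (List Int)) = [] := rfl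
    rw [hinit] at hsw
    simp only [List.length_nil, List.getLast?_nil, List.nil_append] at hsw
    have hinit2 : ((0 : Nat) : Int) - 1 = -1 := by norm_num
    rw [hinit2] at hsw
    rw [hsw]
    -- the written indices equal the mapped bisect values
    have hndfst : (P.map (fun p => p.1)).Nodup := by
      have h1 : ((PySem.List.enumerate ts 0).map (fun p => p.1)).Nodup := by
        have := PySem.List.pairwise_lt_enumerate ts 0
        exact (List.pairwise_map.2 this).imp ne_of_lt
      exact ((hperm.map (fun p => p.1)).nodup_iff).2 h1
    have hposall : ∀ p ∈ P, 0 ≤ p.1 := by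
      intro p hp
      obtain ⟨k, hk, rfl⟩ := (PySem.List.mem_enumerate_iff ts 0 p).1 (hperm.mem_iff.1 hp)
      simp
    have hidx : P.foldl (fun a p => PySem.List.pySetD a p.1 ((S.countP (fun s => decide (s < p.2)) : Int))) (List.replicate ts.length 0)
        = ts.map (fun t => ((PySem.List.bisectLeft S t : Nat) : Int)) := by
      apply List.ext_getElem
      · rw [length_foldl_set (fun t => ((S.countP (fun s => decide (s < t)) : Nat) : Int))]
        simp
      · intro j h1 h2
        have hjn : j < ts.length := by simpa using h2
        have hmem : ((j : Int), ts[j]) ∈ P := by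
          apply hperm.mem_iff.2
          rw [PySem.List.mem_enumerate_iff]
          exact ⟨j, hjn, by simp⟩
        have hlenr : j < (List.replicate ts.length (0 : Int)).length := by simpa using hjn
        have hfin := foldl_set_mem (fun t => ((S.countP (fun s => decide (s < t)) : Nat) : Int))
          P (List.replicate ts.length 0) j ts[j] hposall hndfst hmem hlenr
        simp only [List.getElem_map]
        rw [bisectLeft_eq S ts[j] hSle]
        exact hfin
    refine Prod.ext ?_ ?_
    · exact hAmap.trans hidx.symm
    · rfl
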